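-- pv_equiv track=rewrite | github.com/more-joao/graph-differential | graph_differentials_gui.py | calculate_differentials
-- ===== SOURCE A (Python) =====
-- from itertools import combinations
--
-- def determine_vertices(matrix):
--     vertices = []
--     for i,r in enumerate(matrix):
--         vertices.append(f'v{i}')
--     return vertices
--
-- def determine_edges(matrix, vertices):
--     # assuming it's an undirected graph -> checks lower triangular matrix for existing edges
--     edges = []
--     for i,row in enumerate(matrix):
--         for j,col in enumerate(row):
--             if j>i:
--                 break
--             else:
--                 if matrix[i][j] != 0:
--                     edges.append([vertices[i], vertices[j]])
--     return edges
--
-- def determine_neighbourhood(edges, vertices, target_vertices=[]):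
--     neighbourhood = []
--
--     for v in target_vertices:
--         for e in edges:
--             if v in e:
--                 adjacent_vertex = vertices[vertices.index(e[(e.index(v)+1)%2])]
--                 if adjacent_vertex not in target_vertices and adjacent_vertex not in neighbourhood:
--                     neighbourhood.append(adjacent_vertex)
--
--     return neighbourhood
--
-- def calculate_all_subsets(vertices):
--     subsets = []
--     for n in range(1,len(vertices)+1):
--         for c in combinations(vertices, n):
--             subsets.append(c)
--     return subsets
--
-- def calculate_differentials(matrix):
--     vertices = determine_vertices(matrix)
--     edges = determine_edges(matrix, vertices)
--     graph_differential = None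
--     subsets = calculate_all_subsets(vertices)
--     differential_groups = {}
--
--     for s in subsets:
--         this_neighbourhood = len(determine_neighbourhood(edges, vertices, s))
--         this_differential = this_neighbourhood-len(s)
--
--         if this_differential not in differential_groups:
--             differential_groups[this_differential] = [s]
--         else:
--             if differential_groups != {}:
--                 differential_groups[this_differential].append(s)
--
--         if graph_differential == None or graph_differential < this_differential:
--             graph_differential = this_differential
--
--     return (vertices, edges, differential_groups, graph_differential)
-- ===== SOURCE B (Python) =====
-- from itertools import combinations
--
-- def calculate_differentials(matrix):
--     n = len(matrix)
--     vertices = [f'v{i}' for i in range(n)]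
--     edges = []
--     nb = {v: set() for v in vertices}
--     for i in range(n):
--         for j, val in enumerate(matrix[i]):
--             if j > i:
--                 break
--             if val != 0:
--                 edges.append([vertices[i], vertices[j]])
--                 if i != j:
--                     nb[vertices[i]].add(vertices[j])
--                     nb[vertices[j]].add(vertices[i])
--     groups = {}
--     best = None
--     for k in range(1, n + 1):
--         for comb in combinations(vertices, k):
--             cs = set(comb)
--             d = len(set().union(*(nb[v] for v in comb)) - cs) - k
--             groups.setdefault(d, []).append(comb)
--             if best is None or d > best:
--                 best = d
--     return (vertices, edges, groups, best)
-- ===== Notes on version B (the rewrite author's own statement) =====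
-- stated objective: faster
-- what changed: B precomputes a per-vertex neighbour-set dictionary once while scanning the lower triangle, so each of the 2^n subsets is scored by unioning precomputed sets and subtracting the subset, instead of A's per-subset rescan of the whole edge list with repeated list.index lookups.
import Mathlib
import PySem

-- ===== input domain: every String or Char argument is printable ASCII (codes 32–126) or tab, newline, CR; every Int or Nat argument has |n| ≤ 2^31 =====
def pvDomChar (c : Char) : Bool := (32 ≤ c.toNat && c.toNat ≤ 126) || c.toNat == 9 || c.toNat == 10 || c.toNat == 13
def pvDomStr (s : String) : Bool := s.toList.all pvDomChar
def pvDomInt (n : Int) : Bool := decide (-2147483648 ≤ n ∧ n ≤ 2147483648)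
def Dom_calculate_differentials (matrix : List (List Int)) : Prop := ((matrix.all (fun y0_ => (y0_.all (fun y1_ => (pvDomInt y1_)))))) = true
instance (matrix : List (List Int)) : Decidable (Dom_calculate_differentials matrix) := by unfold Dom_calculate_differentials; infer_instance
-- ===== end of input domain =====

-- B replaces A's per-subset rescan of the edge list (with list.index lookups) by per-vertex
-- neighbour sets built once from the matrix; per subset it unions them and subtracts the subset.
-- ===== PORT A =====
def determine_vertices (matrix : List (List Int)) : List String :=
  (PySem.List.enumerate matrix 0).foldl (fun vs ir => vs ++ ["v" ++ PySem.Int.toStr ir.1]) []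

def edgesRow (vertices : List String) (i : Int) (row : List (Int × Int)) (acc : List (List String)) : List (List String) :=
  match row with
  | [] => acc
  | (j, col) :: rest =>
    if j > i then acc
    else edgesRow vertices i rest
      (if col ≠ 0 then acc ++ [[PySem.List.pyGetD vertices i "", PySem.List.pyGetD vertices j ""]] else acc)

def determine_edges (matrix : List (List Int)) (vertices : List String) : List (List String) :=
  (PySem.List.enumerate matrix 0).foldl
    (fun acc ir => edgesRow vertices ir.1 (PySem.List.enumerate ir.2 0) acc) []

def determine_neighbourhood (edges : List (List String)) (vertices : List String) (target : List String) : List String :=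
  target.foldl (fun nb v =>
    edges.foldl (fun nb e =>
      if v ∈ e then
        match (PySem.List.index? e v).bind (fun idx =>
                (PySem.List.pyGet? e (PySem.Int.mod ((idx : Int) + 1) 2)).bind (fun w =>
                  (PySem.List.index? vertices w).bind (fun k =>
                    PySem.List.pyGet? vertices (k : Int)))) with
        | some adj => if adj ∉ target ∧ adj ∉ nb then nb ++ [adj] else nb
        | none => nb
      else nb) nb) []

def calculate_all_subsets (vertices : List String) : List (List String) :=
  (PySem.List.pyRange 1 ((vertices.length : Int) + 1) 1).foldl
    (fun acc k => acc ++ PySem.List.combinations vertices k.toNat) []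

def calculate_differentials (matrix : List (List Int)) :
    List String × List (List String) × (List (Int × List (List String))) × Option Int :=
  let vertices := determine_vertices matrix
  let edges := determine_edges matrix vertices
  let subsets := calculate_all_subsets vertices
  let st := subsets.foldl
    (fun (st : PySem.Dict Int (List (List String)) × Option Int) s =>
      let thisN : Int := ((determine_neighbourhood edges vertices s).length : Int)
      let thisD : Int := thisN - (s.length : Int)
      let groups := if st.1.contains thisD = false then st.1.insert thisD [s]
                    else if st.1.items ≠ [] then st.1.modify thisD [] (· ++ [s]) else st.1
      let gd := match st.2 with
                | none => some thisD
                | some g => if g < thisD then some thisD else some g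
      (groups, gd)) (PySem.Dict.empty, none)
  (vertices, edges, st.1.items, st.2)

-- ===== PORT B =====
def cdAltRow (vertices : List String) (i : Int) (row : List (Int × Int))
    (st : List (List String) × PySem.Dict String (PySem.Set String)) :
    List (List String) × PySem.Dict String (PySem.Set String) :=
  match row with
  | [] => st
  | (j, val) :: rest =>
    if j > i then st
    else cdAltRow vertices i rest
      (if val ≠ 0 then
        let vi := PySem.List.pyGetD vertices i ""
        let vj := PySem.List.pyGetD vertices j ""
        (st.1 ++ [[vi, vj]],
         if i ≠ j then
           (st.2.modify vi PySem.Set.empty (fun t => PySem.Set.add t vj)).modify vj PySem.Set.empty (fun t => PySem.Set.add t vi)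
         else st.2)
      else st)

def calculate_differentials_alt (matrix : List (List Int)) :
    List String × List (List String) × (List (Int × List (List String))) × Option Int :=
  let n := matrix.length
  let vertices := (List.range n).map (fun i : Nat => "v" ++ PySem.Int.toStr (i : Int))
  let nb0 : PySem.Dict String (PySem.Set String) :=
    vertices.foldl (fun d v => d.insert v PySem.Set.empty) PySem.Dict.empty
  let build := (PySem.List.pyRange 0 (n : Int) 1).foldl
    (fun st i => cdAltRow vertices i (PySem.List.enumerate (PySem.List.pyGetD matrix i []) 0) st)
    ([], nb0)
  let st := (PySem.List.pyRange 1 ((n : Int) + 1) 1).foldl (fun st k =>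
    (PySem.List.combinations vertices k.toNat).foldl
      (fun (st : PySem.Dict Int (List (List String)) × Option Int) comb =>
        let cs := PySem.Set.ofList comb
        let u := comb.foldl (fun u v => PySem.Set.union u (build.2.getD v PySem.Set.empty)) PySem.Set.empty
        let d : Int := ((PySem.Set.diff u cs).length : Int) - (comb.length : Int)
        let groups := (st.1.setdefault d []).modify d [] (· ++ [comb])
        let best := match st.2 with
                    | none => some d
                    | some b => if b < d then some d else some b
        (groups, best)) st) (PySem.Dict.empty, none)
  (vertices, build.1, st.1.items, st.2)


-- ===== PRECONDITION & SPEC =====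
def Spec_calculate_differentials (matrix : List (List Int)) (out : List String × List (List String) × (List (Int × List (List String))) × Option Int) : Prop := out = calculate_differentials_alt matrix
instance (matrix : List (List Int)) (out : List String × List (List String) × (List (Int × List (List String))) × Option Int) : Decidable (Spec_calculate_differentials matrix out) := by unfold Spec_calculate_differentials; infer_instance

-- ===== CLAIM (what is proved, stated in full; the proofs are below) =====
def Claim_equal_calculate_differentials : Prop := ∀ (matrix : List (List Int)), Dom_calculate_differentials matrix → Spec_calculate_differentials matrix (calculate_differentials matrix)

-- ===== LEMMAS AND PROOFS =====

-- the other-endpoint value A's index chain computes on an edge [a, b]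
def pvRes (e : List String) (v : String) : String :=
  match e with
  | [a, b] => if v = a then b else a
  | _ => ""

-- every recorded edge is a pair of vertices
def pvShape (vs : List String) (es : List (List String)) : Prop :=
  ∀ e ∈ es, ∃ a, a ∈ vs ∧ ∃ b, b ∈ vs ∧ e = [a, b]

-- the neighbour dictionary of B mirrors the edge list of A
def pvInv (es : List (List String)) (d : PySem.Dict String (PySem.Set String)) : Prop :=
  ∀ v : String, (d.getD v PySem.Set.empty).Nodup ∧
    (∀ w, w ∈ d.getD v PySem.Set.empty → ∃ e ∈ es, e = [v, w] ∨ e = [w, v]) ∧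
    (∀ w, (∃ e ∈ es, (e = [v, w] ∨ e = [w, v]) ∧ v ≠ w) → w ∈ d.getD v PySem.Set.empty)

lemma pvLookup_eq (vs : List String) (w : String) (hw : w ∈ vs) :
    (PySem.List.index? vs w).bind (fun k => PySem.List.pyGet? vs (k : Int)) = some w := by
  have h1 : (PySem.List.index? vs w).isSome := (PySem.List.index?_isSome_iff vs w).2 hw
  obtain ⟨k, hk⟩ := Option.isSome_iff_exists.1 h1
  obtain ⟨hlt, hget, -⟩ := PySem.List.getElem_of_index?_eq_some hk
  have hk' : List.idxOf? w vs = some k := by simpa using hk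
  simp [hk', List.getElem?_eq_getElem hlt, hget]

lemma pvChain_eq (vs : List String) (a b v : String) (ha : a ∈ vs) (hb : b ∈ vs)
    (hv : v ∈ [a, b]) :
    ((PySem.List.index? [a, b] v).bind (fun idx =>
       (PySem.List.pyGet? [a, b] (PySem.Int.mod ((idx : Int) + 1) 2)).bind (fun w =>
         (PySem.List.index? vs w).bind (fun k => PySem.List.pyGet? vs (k : Int)))))
    = some (if v = a then b else a) := by
  by_cases hva : v = a
  · subst hva
    rw [PySem.List.index?_cons_self]
    have hm : PySem.Int.mod (((0 : Nat) : Int) + 1) 2 = 1 := by decide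
    rw [Option.bind_some, hm]
    have h2 : PySem.List.pyGet? [v, b] (1 : Int) = some b := rfl
    rw [h2, Option.bind_some, pvLookup_eq vs b hb, if_pos rfl]
  · have hvb : v = b := by
      rcases List.mem_cons.1 hv with h | h
      · exact absurd h hva
      · simpa using h
    subst hvb
    rw [PySem.List.index?_cons_of_ne _ (fun h => hva h.symm), PySem.List.index?_cons_self]
    simp only [Option.map_some, Option.bind_some]
    have h2 : PySem.Int.mod (((0 + 1 : Nat) : Int) + 1) 2 = 0 := by decide
    rw [h2]
    have h3 : PySem.List.pyGet? [a, v] (0 : Int) = some a := rfl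
    rw [h3, Option.bind_some, pvLookup_eq vs a ha, if_neg hva]

lemma pvInner_spec (vs : List String) (es : List (List String)) (hsh : pvShape vs es)
    (target : List String) (v : String) (nb : List String) (hnd : nb.Nodup) :
    (es.foldl (fun nb e =>
      if v ∈ e then
        match (PySem.List.index? e v).bind (fun idx =>
                (PySem.List.pyGet? e (PySem.Int.mod ((idx : Int) + 1) 2)).bind (fun w =>
                  (PySem.List.index? vs w).bind (fun k =>
                    PySem.List.pyGet? vs (k : Int)))) with
        | some adj => if adj ∉ target ∧ adj ∉ nb then nb ++ [adj] else nb
        | none => nb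
      else nb) nb).Nodup ∧
    ∀ y, (y ∈ es.foldl (fun nb e =>
      if v ∈ e then
        match (PySem.List.index? e v).bind (fun idx =>
                (PySem.List.pyGet? e (PySem.Int.mod ((idx : Int) + 1) 2)).bind (fun w =>
                  (PySem.List.index? vs w).bind (fun k =>
                    PySem.List.pyGet? vs (k : Int)))) with
        | some adj => if adj ∉ target ∧ adj ∉ nb then nb ++ [adj] else nb
        | none => nb
      else nb) nb ↔ y ∈ nb ∨ ∃ e ∈ es, v ∈ e ∧ pvRes e v = y ∧ y ∉ target) := by
  induction es generalizing nb with
  | nil => exact ⟨hnd, by simp⟩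
  | cons e es ih =>
    obtain ⟨a, ha, b, hb, hab⟩ := hsh e (List.mem_cons_self)
    have hsh' : pvShape vs es := fun e' he' => hsh e' (List.mem_cons_of_mem _ he')
    subst hab
    simp only [List.foldl_cons]
    by_cases hve : v ∈ [a, b]
    · rw [if_pos hve, pvChain_eq vs a b v ha hb hve]
      dsimp only
      have hres : pvRes [a, b] v = if v = a then b else a := rfl
      set adj := if v = a then b else a with hadj
      by_cases hcond : adj ∉ target ∧ adj ∉ nb
      · rw [if_pos hcond]
        have hnd' : (nb ++ [adj]).Nodup := by
          have hadjnb : adj ∉ nb := hcond.2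
          simp only [List.nodup_append, List.nodup_singleton, true_and]
          refine ⟨hnd, ?_⟩
          intro x hx y hy
          simp only [List.mem_singleton] at hy
          subst hy
          exact fun h => hadjnb (h ▸ hx)
        obtain ⟨h1, h2⟩ := ih hsh' (nb ++ [adj]) hnd'
        refine ⟨h1, fun y => (h2 y).trans ?_⟩
        constructor
        · rintro (hy | hy)
          · rcases List.mem_append.1 hy with hy | hy
            · exact Or.inl hy
            · refine Or.inr ⟨[a, b], List.mem_cons_self, hve, ?_, ?_⟩
              · simp at hy; rw [hres, hy]
              · simp at hy; rw [← hy] at hcond; exact hcond.1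
          · obtain ⟨e', he', rest⟩ := hy
            exact Or.inr ⟨e', List.mem_cons_of_mem _ he', rest⟩
        · rintro (hy | ⟨e', he', hv', hr', ht'⟩)
          · exact Or.inl (List.mem_append.2 (Or.inl hy))
          · rcases List.mem_cons.1 he' with he' | he'
            · subst he'
              rw [hres] at hr'
              exact Or.inl (List.mem_append.2 (Or.inr (by simp [← hr'])))
            · exact Or.inr ⟨e', he', hv', hr', ht'⟩
      · rw [if_neg hcond]
        obtain ⟨h1, h2⟩ := ih hsh' nb hnd
        refine ⟨h1, fun y => (h2 y).trans ?_⟩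
        constructor
        · rintro (hy | ⟨e', he', rest⟩)
          · exact Or.inl hy
          · exact Or.inr ⟨e', List.mem_cons_of_mem _ he', rest⟩
        · rintro (hy | ⟨e', he', hv', hr', ht'⟩)
          · exact Or.inl hy
          · rcases List.mem_cons.1 he' with he' | he'
            · subst he'
              rw [hres] at hr'
              rcases not_and_or.1 hcond with hc | hc
              · exact absurd ht' (by rw [← hr']; simpa using hc)
              · exact Or.inl (by rw [← hr']; simpa using hc)
            · exact Or.inr ⟨e', he', hv', hr', ht'⟩
    · rw [if_neg hve]
      obtain ⟨h1, h2⟩ := ih hsh' nb hnd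
      refine ⟨h1, fun y => (h2 y).trans ?_⟩
      constructor
      · rintro (hy | ⟨e', he', rest⟩)
        · exact Or.inl hy
        · exact Or.inr ⟨e', List.mem_cons_of_mem _ he', rest⟩
      · rintro (hy | ⟨e', he', hv', hr', ht'⟩)
        · exact Or.inl hy
        · rcases List.mem_cons.1 he' with he' | he'
          · subst he'; exact absurd hv' hve
          · exact Or.inr ⟨e', he', hv', hr', ht'⟩

lemma pvOuter_spec (vs : List String) (es : List (List String)) (hsh : pvShape vs es)
    (target : List String) :
    ∀ (tvs : List String) (nb : List String), nb.Nodup →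
    (tvs.foldl (fun nb v =>
      es.foldl (fun nb e =>
        if v ∈ e then
          match (PySem.List.index? e v).bind (fun idx =>
                  (PySem.List.pyGet? e (PySem.Int.mod ((idx : Int) + 1) 2)).bind (fun w =>
                    (PySem.List.index? vs w).bind (fun k =>
                      PySem.List.pyGet? vs (k : Int)))) with
          | some adj => if adj ∉ target ∧ adj ∉ nb then nb ++ [adj] else nb
          | none => nb
        else nb) nb) nb).Nodup ∧
    ∀ y, (y ∈ tvs.foldl (fun nb v =>
      es.foldl (fun nb e =>
        if v ∈ e then
          match (PySem.List.index? e v).bind (fun idx =>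
                  (PySem.List.pyGet? e (PySem.Int.mod ((idx : Int) + 1) 2)).bind (fun w =>
                    (PySem.List.index? vs w).bind (fun k =>
                      PySem.List.pyGet? vs (k : Int)))) with
          | some adj => if adj ∉ target ∧ adj ∉ nb then nb ++ [adj] else nb
          | none => nb
        else nb) nb) nb ↔
      y ∈ nb ∨ ∃ v ∈ tvs, ∃ e ∈ es, v ∈ e ∧ pvRes e v = y ∧ y ∉ target) := by
  intro tvs
  induction tvs with
  | nil => intro nb hnd; exact ⟨hnd, by simp⟩
  | cons t ts ih =>
    intro nb hnd
    simp only [List.foldl_cons]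
    obtain ⟨h1, h2⟩ := pvInner_spec vs es hsh target t nb hnd
    obtain ⟨h3, h4⟩ := ih _ h1
    refine ⟨h3, fun y => (h4 y).trans ?_⟩
    rw [h2 y]
    constructor
    · rintro ((hy | ⟨e, he, hve, hr, ht⟩) | ⟨v, hv, rest⟩)
      · exact Or.inl hy
      · exact Or.inr ⟨t, List.mem_cons_self, e, he, hve, hr, ht⟩
      · exact Or.inr ⟨v, List.mem_cons_of_mem _ hv, rest⟩
    · rintro (hy | ⟨v, hv, rest⟩)
      · exact Or.inl (Or.inl hy)
      · rcases List.mem_cons.1 hv with hv | hv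
        · subst hv; exact Or.inl (Or.inr rest)
        · exact Or.inr ⟨v, hv, rest⟩

lemma pvNeigh_spec (vs : List String) (es : List (List String)) (hsh : pvShape vs es)
    (target : List String) :
    (determine_neighbourhood es vs target).Nodup ∧
    ∀ y, (y ∈ determine_neighbourhood es vs target ↔
      ∃ v ∈ target, ∃ e ∈ es, v ∈ e ∧ pvRes e v = y ∧ y ∉ target) := by
  obtain ⟨h1, h2⟩ := pvOuter_spec vs es hsh target target [] (by simp)
  exact ⟨h1, fun y => (h2 y).trans (by simp)⟩

lemma pvUnion_spec (nbd : PySem.Dict String (PySem.Set String)) (s : List String)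
    (u0 : PySem.Set String) (h : u0.Nodup) :
    (s.foldl (fun u v => PySem.Set.union u (nbd.getD v PySem.Set.empty)) u0).Nodup ∧
    ∀ y, (y ∈ s.foldl (fun u v => PySem.Set.union u (nbd.getD v PySem.Set.empty)) u0 ↔
      y ∈ u0 ∨ ∃ v ∈ s, y ∈ nbd.getD v PySem.Set.empty) := by
  induction s generalizing u0 with
  | nil => exact ⟨h, by simp⟩
  | cons x xs ih =>
    simp only [List.foldl_cons]
    obtain ⟨h1, h2⟩ := ih _ (PySem.Set.nodup_union _ _ h)
    refine ⟨h1, fun y => (h2 y).trans ?_⟩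
    rw [PySem.Set.mem_union]
    constructor
    · rintro ((hy | hy) | ⟨v, hv, hy⟩)
      · exact Or.inl hy
      · exact Or.inr ⟨x, List.mem_cons_self, hy⟩
      · exact Or.inr ⟨v, List.mem_cons_of_mem _ hv, hy⟩
    · rintro (hy | ⟨v, hv, hy⟩)
      · exact Or.inl (Or.inl hy)
      · rcases List.mem_cons.1 hv with hv | hv
        · subst hv; exact Or.inl (Or.inr hy)
        · exact Or.inr ⟨v, hv, hy⟩

lemma pvCount_eq (vs : List String) (es : List (List String))
    (nbd : PySem.Dict String (PySem.Set String)) (hsh : pvShape vs es) (hinv : pvInv es nbd)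
    (s : List String) :
    (determine_neighbourhood es vs s).length =
    (PySem.Set.diff
      (s.foldl (fun u v => PySem.Set.union u (nbd.getD v PySem.Set.empty)) PySem.Set.empty)
      (PySem.Set.ofList s)).length := by
  obtain ⟨hnd1, hmem1⟩ := pvNeigh_spec vs es hsh s
  obtain ⟨hndu, hmemu⟩ := pvUnion_spec nbd s PySem.Set.empty (by simp [PySem.Set.empty])
  have hnd2 := PySem.Set.nodup_diff _ (PySem.Set.ofList s) hndu
  refine List.Perm.length_eq ?_
  rw [List.perm_ext_iff_of_nodup hnd1 hnd2]
  intro y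
  rw [hmem1 y, PySem.Set.mem_diff, hmemu y, PySem.Set.mem_ofList]
  constructor
  · rintro ⟨v, hv, e, he, hve, hr, hys⟩
    refine ⟨Or.inr ⟨v, hv, ?_⟩, hys⟩
    obtain ⟨a, -, b, -, hab⟩ := hsh e he
    subst hab
    have hyv : v ≠ y := fun h => hys (h ▸ hv)
    rcases List.mem_cons.1 hve with hva | hvb
    · subst hva
      have : y = b := by simpa [pvRes] using hr.symm
      subst this
      exact (hinv v).2.2 y ⟨[v, y], he, Or.inl rfl, hyv⟩
    · by_cases hva : v = a
      · subst hva
        have : y = b := by simpa [pvRes] using hr.symm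
        subst this
        exact (hinv v).2.2 y ⟨[v, y], he, Or.inl rfl, hyv⟩
      · have hvb' : v = b := by simpa [hva] using hvb
        subst hvb'
        have : y = a := by simp [pvRes, hva] at hr; exact hr.symm
        subst this
        exact (hinv v).2.2 y ⟨[y, v], he, Or.inr rfl, hyv⟩
  · rintro ⟨hy | ⟨v, hv, hy⟩, hys⟩
    · exact absurd hy (by simp [PySem.Set.empty])
    · obtain ⟨e, he, hor⟩ := (hinv v).2.1 y hy
      rcases hor with heq | heq
      · subst heq
        exact ⟨v, hv, [v, y], he, List.mem_cons_self, by simp [pvRes], hys⟩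
      · subst heq
        refine ⟨v, hv, [y, v], he, by simp, ?_, hys⟩
        have hyv : v ≠ y := fun h => hys (h ▸ hv)
        have : ¬ (v = y) := hyv
        simp [pvRes, this]

lemma pvContains_items_ne (g : PySem.Dict Int (List (List String))) (k : Int)
    (h : g.contains k = true) : g.items ≠ [] := by
  intro he
  have : g = PySem.Dict.mk [] := PySem.Dict.ext he
  subst this
  simp [PySem.Dict.contains_mk] at h

lemma pvGroups_eq (g : PySem.Dict Int (List (List String))) (k : Int) (s : List String) :
    (if g.contains k = false then g.insert k [s]
     else if g.items ≠ [] then g.modify k [] (· ++ [s]) else g)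
    = (g.setdefault k []).modify k [] (· ++ [s]) := by
  by_cases hc : g.contains k = true
  · rw [if_neg (by simp [hc]), if_pos (pvContains_items_ne g k hc),
      PySem.Dict.setdefault_of_contains g [] hc]
  · have hc' : g.contains k = false := by simpa using hc
    rw [if_pos hc', PySem.Dict.setdefault_of_not_contains g [] hc']
    show g.insert k [s] = (g.insert k []).insert k (((g.insert k []).getD k []) ++ [s])
    rw [PySem.Dict.getD_insert_self, PySem.Dict.insert_insert_self, List.nil_append]

lemma pvFoldl_flat {α β γ : Type} (l : List γ) (g : γ → List α) (step : β → α → β) (init : β) :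
    (l.foldl (fun acc k => acc ++ g k) []).foldl step init
    = l.foldl (fun st k => (g k).foldl step st) init := by
  rw [PySem.List.foldl_append_eq_flatMap g l []]
  rw [List.nil_append]
  induction l generalizing init with
  | nil => rfl
  | cons x xs ih => rw [List.flatMap_cons, List.foldl_append, List.foldl_cons, ih]

lemma pvVerts_eq (matrix : List (List Int)) :
    determine_vertices matrix
    = (List.range matrix.length).map (fun i : Nat => "v" ++ PySem.Int.toStr (i : Int)) := by
  unfold determine_vertices
  rw [PySem.List.foldl_append_singleton_eq_map]
  rw [PySem.List.enumerate_eq_map_pyRange matrix []]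
  rw [PySem.List.pyRange_one]
  simp only [PySem.List.len_eq, List.map_map, List.nil_append]
  have h0 : (((matrix.length : Int)) - 0).toNat = matrix.length := by omega
  rw [h0]
  exact List.map_congr_left (fun k _ => by simp)

lemma pvNb0_getD (vs : List String) (d : PySem.Dict String (PySem.Set String))
    (h : ∀ v, d.getD v PySem.Set.empty = PySem.Set.empty) :
    ∀ v, (vs.foldl (fun d v => d.insert v PySem.Set.empty) d).getD v PySem.Set.empty
      = PySem.Set.empty := by
  induction vs generalizing d with
  | nil => exact h
  | cons x xs ih =>
    intro v
    refine ih _ (fun v' => ?_) v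
    rw [PySem.Dict.getD_insert]
    split
    · rfl
    · exact h v'

lemma pvRow_inv_step (es : List (List String)) (d : PySem.Dict String (PySem.Set String))
    (hinv : pvInv es d) (vi vj : String) (huse : Prop) [Decidable huse]
    (himp : ¬ huse → vi = vj) :
    pvInv (es ++ [[vi, vj]])
      (if huse then
        (d.modify vi PySem.Set.empty (fun t => PySem.Set.add t vj)).modify vj PySem.Set.empty (fun t => PySem.Set.add t vi)
       else d) := by
  by_cases hu : huse
  · rw [if_pos hu]
    intro v
    have hG : (((d.modify vi PySem.Set.empty (fun t => PySem.Set.add t vj)).modify vj PySem.Set.empty (fun t => PySem.Set.add t vi)).getD v PySem.Set.empty)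
        = if v = vj then PySem.Set.add (if vj = vi then PySem.Set.add (d.getD vi PySem.Set.empty) vj else d.getD vj PySem.Set.empty) vi
          else (if v = vi then PySem.Set.add (d.getD vi PySem.Set.empty) vj else d.getD v PySem.Set.empty) := by
      rw [PySem.Dict.getD_modify]
      split
      · rw [PySem.Dict.getD_modify]
      · rw [PySem.Dict.getD_modify]
    rw [hG]
    refine ⟨?_, ?_, ?_⟩
    · have h1 := (hinv vi).1
      have h2 := (hinv vj).1
      have h3 := (hinv v).1
      split_ifs with hvvj hji hvvi
      · exact PySem.Set.nodup_add _ _ (PySem.Set.nodup_add _ _ h1)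
      · exact PySem.Set.nodup_add _ _ h2
      · exact PySem.Set.nodup_add _ _ h1
      · exact h3
    · intro w hw
      split_ifs at hw with hvvj hji hvvi
      · rcases (PySem.Set.mem_add _ _ _).1 hw with hw | hw
        · rcases (PySem.Set.mem_add _ _ _).1 hw with hw | hw
          · obtain ⟨e, he, ho⟩ := (hinv vi).2.1 w hw
            refine ⟨e, List.mem_append_left _ he, ?_⟩
            rw [hvvj, hji]
            exact ho
          · exact ⟨[vi, vj], List.mem_append_right _ (by simp), Or.inl (by simp [hvvj, hji, hw])⟩
        · exact ⟨[vi, vj], List.mem_append_right _ (by simp), Or.inr (by simp [hvvj, hw])⟩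
      · rcases (PySem.Set.mem_add _ _ _).1 hw with hw | hw
        · obtain ⟨e, he, ho⟩ := (hinv vj).2.1 w hw
          refine ⟨e, List.mem_append_left _ he, ?_⟩
          rw [hvvj]
          exact ho
        · exact ⟨[vi, vj], List.mem_append_right _ (by simp), Or.inr (by simp [hvvj, hw])⟩
      · rcases (PySem.Set.mem_add _ _ _).1 hw with hw | hw
        · obtain ⟨e, he, ho⟩ := (hinv vi).2.1 w hw
          refine ⟨e, List.mem_append_left _ he, ?_⟩
          rw [hvvi]
          exact ho
        · exact ⟨[vi, vj], List.mem_append_right _ (by simp), Or.inl (by simp [hvvi, hw])⟩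
      · obtain ⟨e, he, ho⟩ := (hinv v).2.1 w hw
        exact ⟨e, List.mem_append_left _ he, ho⟩
    · intro w hex
      obtain ⟨e, he, ho, hvw⟩ := hex
      have hsub : w ∈ d.getD v PySem.Set.empty →
          w ∈ (if v = vj then PySem.Set.add (if vj = vi then PySem.Set.add (d.getD vi PySem.Set.empty) vj else d.getD vj PySem.Set.empty) vi
          else (if v = vi then PySem.Set.add (d.getD vi PySem.Set.empty) vj else d.getD v PySem.Set.empty)) := by
        intro hm
        split_ifs with hvvj hji hvvi
        · rw [PySem.Set.mem_add, PySem.Set.mem_add]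
          exact Or.inl (Or.inl (by rw [← hji, ← hvvj]; exact hm))
        · rw [PySem.Set.mem_add]
          exact Or.inl (by rw [← hvvj]; exact hm)
        · rw [PySem.Set.mem_add]
          exact Or.inl (by rw [← hvvi]; exact hm)
        · exact hm
      rcases List.mem_append.1 he with he | he
      · exact hsub ((hinv v).2.2 w ⟨e, he, ho, hvw⟩)
      · simp only [List.mem_singleton] at he
        subst he
        rcases ho with ho | ho
        · obtain ⟨h1, h2⟩ : vi = v ∧ vj = w := by simpa using ho
          rw [if_neg (fun h => hvw (h.trans h2)), if_pos h1.symm, PySem.Set.mem_add]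
          exact Or.inr h2.symm
        · obtain ⟨h1, h2⟩ : vi = w ∧ vj = v := by simpa using ho
          rw [if_pos h2.symm, PySem.Set.mem_add]
          exact Or.inr h1.symm
  · rw [if_neg hu]
    have hij : vi = vj := himp hu
    intro v
    obtain ⟨hnd, hfwd, hbwd⟩ := hinv v
    refine ⟨hnd, ?_, ?_⟩
    · intro w hw
      obtain ⟨e, he, ho⟩ := hfwd w hw
      exact ⟨e, List.mem_append_left _ he, ho⟩
    · intro w hex
      obtain ⟨e, he, ho, hvw⟩ := hex
      rcases List.mem_append.1 he with he | he
      · exact hbwd w ⟨e, he, ho, hvw⟩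
      · simp only [List.mem_singleton] at he
        subst he
        exfalso
        rcases ho with ho | ho
        · obtain ⟨h1, h2⟩ : vi = v ∧ vj = w := by simpa using ho
          exact hvw (h1 ▸ h2 ▸ hij)
        · obtain ⟨h1, h2⟩ : vi = w ∧ vj = v := by simpa using ho
          exact hvw (h2 ▸ h1 ▸ hij.symm)

lemma pvRow_gen (vs : List String) (i : Int) (h0 : 0 ≤ i) (hi : i < (vs.length : Int)) :
    ∀ (row : List (Int × Int)) (st : List (List String) × PySem.Dict String (PySem.Set String)),
      (∀ p ∈ row, 0 ≤ p.1) → pvInv st.1 st.2 → pvShape vs st.1 →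
      (cdAltRow vs i row st).1 = edgesRow vs i row st.1
      ∧ pvInv (cdAltRow vs i row st).1 (cdAltRow vs i row st).2
      ∧ pvShape vs (cdAltRow vs i row st).1 := by
  intro row
  induction row with
  | nil => intro st _ hinv hsh; exact ⟨rfl, hinv, hsh⟩
  | cons p rest ih =>
    obtain ⟨j, val⟩ := p
    intro st hpos hinv hsh
    by_cases hj : j > i
    · simp only [cdAltRow, edgesRow, if_pos hj]
      exact ⟨trivial, hinv, hsh⟩
    · simp only [cdAltRow, edgesRow, if_neg hj]
      have hj0 : 0 ≤ j := hpos (j, val) List.mem_cons_self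
      have hpos' : ∀ p ∈ rest, 0 ≤ p.1 := fun p hp => hpos p (List.mem_cons_of_mem _ hp)
      by_cases hval : val ≠ 0
      · rw [if_pos hval, if_pos hval]
        have hiR : PySem.Raise.InRange vs.length i := ⟨by omega, hi⟩
        have hjR : PySem.Raise.InRange vs.length j := ⟨by omega, by omega⟩
        have hvi : PySem.List.pyGetD vs i "" ∈ vs := PySem.List.pyGetD_mem vs "" hiR
        have hvj : PySem.List.pyGetD vs j "" ∈ vs := PySem.List.pyGetD_mem vs "" hjR
        have hsh' : pvShape vs (st.1 ++ [[PySem.List.pyGetD vs i "", PySem.List.pyGetD vs j ""]]) := by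
          intro e he
          rcases List.mem_append.1 he with he | he
          · exact hsh e he
          · simp only [List.mem_singleton] at he
            exact ⟨_, hvi, _, hvj, he⟩
        have hinv' := pvRow_inv_step st.1 st.2 hinv (PySem.List.pyGetD vs i "")
          (PySem.List.pyGetD vs j "") (i ≠ j)
          (fun h => by rw [not_not.1 h])
        exact ih _ hpos' hinv' hsh'
      · rw [if_neg hval, if_neg hval]
        exact ih _ hpos' hinv hsh

lemma pvBuild_gen (matrix : List (List Int)) (vs : List String)
    (hlen : vs.length = matrix.length) (is : List Int)
    (his : ∀ i ∈ is, 0 ≤ i ∧ i < (matrix.length : Int))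
    (st : List (List String) × PySem.Dict String (PySem.Set String))
    (hinv : pvInv st.1 st.2) (hsh : pvShape vs st.1) :
    (is.foldl (fun st i =>
        cdAltRow vs i (PySem.List.enumerate (PySem.List.pyGetD matrix i []) 0) st) st).1
      = is.foldl (fun acc i =>
          edgesRow vs i (PySem.List.enumerate (PySem.List.pyGetD matrix i []) 0) acc) st.1
    ∧ pvInv (is.foldl (fun st i =>
        cdAltRow vs i (PySem.List.enumerate (PySem.List.pyGetD matrix i []) 0) st) st).1
        (is.foldl (fun st i =>
        cdAltRow vs i (PySem.List.enumerate (PySem.List.pyGetD matrix i []) 0) st) st).2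
    ∧ pvShape vs (is.foldl (fun st i =>
        cdAltRow vs i (PySem.List.enumerate (PySem.List.pyGetD matrix i []) 0) st) st).1 := by
  induction is generalizing st with
  | nil => exact ⟨rfl, hinv, hsh⟩
  | cons i is ih =>
    obtain ⟨h0, hi⟩ := his i List.mem_cons_self
    have his' : ∀ i' ∈ is, 0 ≤ i' ∧ i' < (matrix.length : Int) :=
      fun i' hi' => his i' (List.mem_cons_of_mem _ hi')
    have hpos : ∀ p ∈ PySem.List.enumerate (PySem.List.pyGetD matrix i []) 0, 0 ≤ p.1 := by
      intro p hp
      obtain ⟨k, hk, hpk⟩ := (PySem.List.mem_enumerate_iff _ _ _).1 hp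
      subst hpk
      simp
    obtain ⟨he, hinv', hsh'⟩ := pvRow_gen vs i h0 (by rw [hlen]; exact_mod_cast hi)
      (PySem.List.enumerate (PySem.List.pyGetD matrix i []) 0) st hpos hinv hsh
    simp only [List.foldl_cons]
    obtain ⟨ha, hb, hc⟩ := ih his' _ hinv' hsh'
    exact ⟨by rw [ha, he], hb, hc⟩


-- ===== VERDICT (by name: the statement is the Claim_ definition above) =====
theorem calculate_differentials_spec : Claim_equal_calculate_differentials := by
  intro matrix _
  unfold Spec_calculate_differentials
  simp only [calculate_differentials, calculate_differentials_alt]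
  rw [pvVerts_eq matrix]
  set VB := (List.range matrix.length).map (fun i : Nat => "v" ++ PySem.Int.toStr (i : Int)) with hVB
  set NB0 := VB.foldl (fun d v => d.insert v PySem.Set.empty) PySem.Dict.empty with hNB0
  set BLD := (PySem.List.pyRange 0 (matrix.length : Int) 1).foldl
      (fun st i => cdAltRow VB i (PySem.List.enumerate (PySem.List.pyGetD matrix i []) 0) st)
      ([], NB0) with hBLD
  have hlen : VB.length = matrix.length := by simp [hVB]
  have his : ∀ i ∈ PySem.List.pyRange 0 (matrix.length : Int) 1, 0 ≤ i ∧ i < (matrix.length : Int) := by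
    intro i hi
    rw [PySem.List.mem_pyRange_one] at hi
    exact hi
  have hnb0 : ∀ v, NB0.getD v PySem.Set.empty = PySem.Set.empty :=
    pvNb0_getD VB PySem.Dict.empty (fun v => by rw [PySem.Dict.getD_empty])
  have hinv0 : pvInv [] NB0 := by
    intro v
    refine ⟨?_, ?_, ?_⟩
    · rw [hnb0 v]; exact List.nodup_nil
    · intro w hw
      rw [hnb0 v] at hw
      exact absurd hw (List.not_mem_nil)
    · rintro w ⟨e, he, -⟩
      exact absurd he (List.not_mem_nil)
  have hsh0 : pvShape VB [] := by
    rintro e he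
    exact absurd he (List.not_mem_nil)
  have hbg := pvBuild_gen matrix VB hlen (PySem.List.pyRange 0 (matrix.length : Int) 1) his
    ([], NB0) hinv0 hsh0
  rw [← hBLD] at hbg
  obtain ⟨hb1, hinv, hsh⟩ := hbg
  have hde : determine_edges matrix VB
      = (PySem.List.pyRange 0 (matrix.length : Int) 1).foldl
          (fun acc i => edgesRow VB i (PySem.List.enumerate (PySem.List.pyGetD matrix i []) 0) acc) [] := by
    unfold determine_edges
    rw [PySem.List.enumerate_eq_map_pyRange matrix ([] : List Int), List.foldl_map]
    simp only [PySem.List.len_eq]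
  have hedge : determine_edges matrix VB = BLD.1 := by rw [hde, hb1]
  rw [hedge]
  have hsubs : calculate_all_subsets VB
      = (PySem.List.pyRange 1 ((matrix.length : Int) + 1) 1).foldl
          (fun acc k => acc ++ PySem.List.combinations VB k.toNat) [] := by
    unfold calculate_all_subsets
    rw [hlen]
  rw [hsubs, pvFoldl_flat]
  refine congrArg (fun z : PySem.Dict Int (List (List String)) × Option Int =>
    (VB, BLD.1, z.1.items, z.2)) ?_
  apply PySem.List.foldl_congr_mem
  intro st k hk
  apply PySem.List.foldl_congr_mem
  intro st2 s hs
  have hd : ((determine_neighbourhood BLD.1 VB s).length : Int) - (s.length : Int)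
      = ((((s.foldl (fun u v => PySem.Set.union u (BLD.2.getD v PySem.Set.empty))
            PySem.Set.empty).diff (PySem.Set.ofList s)).length : Int)) - (s.length : Int) := by
    rw [pvCount_eq VB BLD.1 BLD.2 hsh hinv s]
  rw [← hd, pvGroups_eq st2.1 _ s]
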